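-- pv_equiv track=rewrite | github.com/Ofekyaloz/Networks-Cloud | server.py | order
-- ===== SOURCE A (Python) =====
-- SEND_DIR = "send-dir"
--
-- def order(changes_for_client):
--     lst = []
--     for change in changes_for_client:
--         request = change[0]
--         if request.startswith(SEND_DIR):
--             lst.append(change)
--
--     for change in changes_for_client:
--         request = change[0]
--         if not request.startswith(SEND_DIR):
--             lst.append(change)
--     return lst
-- ===== SOURCE B (Python) =====
-- SEND_DIR = "send-dir"
--
-- def order(changes_for_client):
--     # Stable sort on a binary key: SEND_DIR-prefixed requests first (original
--     # order preserved), then the rest (original order preserved).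
--     return sorted(changes_for_client,
--                   key=lambda c: 0 if c[0].startswith(SEND_DIR) else 1)
-- ===== Notes on version B (the rewrite author's own statement) =====
-- stated objective: idiomatic
-- what changed: Replaces A's two explicit filtering passes that append into an accumulator with a single stable sort on a binary key (0 if the request starts with SEND_DIR, else 1), relying on sort stability to keep each group's original order.
import Mathlib
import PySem

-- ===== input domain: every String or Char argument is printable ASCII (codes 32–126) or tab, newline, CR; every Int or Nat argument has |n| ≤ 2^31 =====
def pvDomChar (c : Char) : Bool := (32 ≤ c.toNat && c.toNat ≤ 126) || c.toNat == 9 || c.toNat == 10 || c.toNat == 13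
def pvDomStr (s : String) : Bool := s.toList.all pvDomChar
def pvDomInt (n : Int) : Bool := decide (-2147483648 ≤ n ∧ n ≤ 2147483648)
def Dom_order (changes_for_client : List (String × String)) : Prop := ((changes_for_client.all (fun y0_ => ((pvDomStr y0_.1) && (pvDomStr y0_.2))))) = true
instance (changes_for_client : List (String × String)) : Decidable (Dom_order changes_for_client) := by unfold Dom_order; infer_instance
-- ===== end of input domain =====

-- B replaces A's two explicit filter-and-append passes with one stable sort on a
-- binary key (0 for SEND_DIR-prefixed requests, 1 otherwise); idiomatic, not faster.


-- ===== PORT A =====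
def order (changes_for_client : List (String × String)) : List (String × String) :=
  let lst := changes_for_client.foldl (fun lst change =>
    let request := change.1
    if PySem.Str.startswith request "send-dir" then lst ++ [change] else lst) []
  changes_for_client.foldl (fun lst change =>
    let request := change.1
    if !(PySem.Str.startswith request "send-dir") then lst ++ [change] else lst) lst

-- ===== PORT B =====
def order_alt (changes_for_client : List (String × String)) : List (String × String) :=
  PySem.List.sorted changes_for_client
    (fun c => if PySem.Str.startswith c.1 "send-dir" then (0 : Int) else 1)

-- ===== PRECONDITION & SPEC =====
def Spec_order (changes_for_client : List (String × String)) (out : List (String × String)) : Prop := out = order_alt changes_for_client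
instance (changes_for_client : List (String × String)) (out : List (String × String)) : Decidable (Spec_order changes_for_client out) := by unfold Spec_order; infer_instance

-- ===== CLAIM (what is proved, stated in full; the proofs are below) =====
def Claim_equal_order : Prop := ∀ (changes_for_client : List (String × String)), Dom_order changes_for_client → Spec_order changes_for_client (order changes_for_client)

-- ===== LEMMAS AND PROOFS =====

-- Inserting x into a list partitioned as (all key-0) ++ (all key-1): x lands at the
-- 0/1 boundary when its key is 0, at the end when its key is 1 (stable insertion).
theorem insertBy_partition {α : Type} (p : α → Bool) (x : α) (A B : List α)
    (hA : ∀ a ∈ A, p a = true) (hB : ∀ b ∈ B, p b = false) :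
    PySem.List.insertBy
      (fun a b => decide ((if p a then (0 : Int) else 1) < (if p b then (0 : Int) else 1))) x
      (A ++ B)
      = if p x then A ++ x :: B else (A ++ B) ++ [x] := by
  by_cases hx : p x = true
  · simp only [hx, if_pos]
    induction A with
    | nil =>
      cases B with
      | nil => simp [PySem.List.insertBy]
      | cons b B' =>
        have hb := hB b (by simp)
        simp [PySem.List.insertBy, hx, hb]
    | cons a A' ih =>
      have ha := hA a (by simp)
      simp only [List.cons_append]
      simp [PySem.List.insertBy, hx, ha]
      exact ih (fun a' h => hA a' (by simp [h]))
  · have hx' : p x = false := by simpa using hx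
    rw [if_neg (by simp [hx']), PySem.List.insertBy_of_forall_not_before]
    intro y hy
    rcases List.mem_append.mp hy with h | h
    · simp [hA y h, hx']
    · simp [hB y h, hx']

-- Loop invariant for the insertion-sort fold with a binary key: the accumulator
-- stays a partition (zeros ++ ones) and each group grows in input order.
theorem foldl_insertBy_partition {α : Type} (p : α → Bool) (xs : List α) :
    ∀ (A B : List α), (∀ a ∈ A, p a = true) → (∀ b ∈ B, p b = false) →
    xs.foldl (fun acc x => PySem.List.insertBy
        (fun a b => decide ((if p a then (0 : Int) else 1) < (if p b then (0 : Int) else 1))) x acc)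
      (A ++ B)
      = (A ++ xs.filter p) ++ (B ++ xs.filter (fun a => !p a)) := by
  induction xs with
  | nil => intro A B _ _; simp
  | cons x xs ih =>
    intro A B hA hB
    simp only [List.foldl_cons]
    rw [insertBy_partition p x A B hA hB]
    by_cases hx : p x = true
    · simp only [hx, if_pos]
      have : A ++ x :: B = (A ++ [x]) ++ B := by simp
      rw [this, ih (A ++ [x]) B
        (by intro a ha; rcases List.mem_append.mp ha with h | h
            · exact hA a h
            · simp at h; subst h; exact hx) hB]
      simp [hx]
    · have hx' : p x = false := by simpa using hx
      rw [if_neg (by simp [hx'])]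
      have : (A ++ B) ++ [x] = A ++ (B ++ [x]) := by simp
      rw [this, ih A (B ++ [x]) hA
        (by intro b hb; rcases List.mem_append.mp hb with h | h
            · exact hB b h
            · simp at h; subst h; exact hx')]
      simp [hx']

-- ===== VERDICT (by name: the statement is the Claim_ definition above) =====
theorem order_spec : Claim_equal_order := by
  unfold Claim_equal_order
  intro xs _
  unfold Spec_order order order_alt
  have hB := foldl_insertBy_partition
    (fun c : String × String => PySem.Str.startswith c.1 "send-dir") xs [] [] (by simp) (by simp)
  simp only [List.nil_append, List.append_nil] at hB
  have hA1 := PySem.List.foldl_append_if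
    (fun c : String × String => PySem.Str.startswith c.1 "send-dir") (fun c => c) xs []
  have hA2 := PySem.List.foldl_append_if
    (fun c : String × String => !PySem.Str.startswith c.1 "send-dir") (fun c => c) xs
    (List.map (fun c => c) (List.filter (fun c : String × String => PySem.Str.startswith c.1 "send-dir") xs))
  simp only [List.map_id', List.nil_append] at hA1 hA2
  show xs.foldl (fun lst change => if !PySem.Str.startswith change.1 "send-dir" then lst ++ [change] else lst)
        (xs.foldl (fun lst change => if PySem.Str.startswith change.1 "send-dir" then lst ++ [change] else lst) [])
      = PySem.List.sorted xs (fun c => if PySem.Str.startswith c.1 "send-dir" then (0 : Int) else 1)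
  rw [PySem.List.sorted_eq_foldl_insertBy, hB, hA1, hA2]
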